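-- pv_equiv track=rewrite | github.com/AESpider/maths | crypto/attack/rsa/e3_signature_forgery.py | ceil_cube_root
-- ===== SOURCE A (Python) =====
-- def ceil_cube_root(n: int) -> int:
--     """Return the integer ceil of the cube root of n."""
--     if n < 0:
--         raise ValueError("n must be non-negative")
--     lo, hi = 0, 1 << ((n.bit_length() + 2) // 3)  # initial upper bound
--     while lo < hi:
--         mid = (lo + hi) // 2
--         if mid**3 < n:
--             lo = mid + 1
--         else:
--             hi = mid
--     return lo
-- ===== SOURCE B (Python) =====
-- def ceil_cube_root(n: int) -> int:
--     """Return the integer ceil of the cube root of n."""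
--     if n < 0:
--         raise ValueError("n must be non-negative")
--     if n == 0:
--         return 0
--     # Newton's method for the floor cube root, then round up unless exact.
--     x = 1 << ((n.bit_length() + 2) // 3)
--     while True:
--         y = (2 * x + n // (x * x)) // 3
--         if y >= x:
--             break
--         x = y
--     return x if x ** 3 == n else x + 1
-- ===== Notes on version B (the rewrite author's own statement) =====
-- stated objective: alternative
-- what changed: Replaces A's [lo,hi) binary search with Newton's integer iteration x = (2*x + n//(x*x))//3 converging to the floor cube root, followed by a perfect-cube check to round up; Pre_ excludes n < 0 where both raise ValueError.
import Mathlib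
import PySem

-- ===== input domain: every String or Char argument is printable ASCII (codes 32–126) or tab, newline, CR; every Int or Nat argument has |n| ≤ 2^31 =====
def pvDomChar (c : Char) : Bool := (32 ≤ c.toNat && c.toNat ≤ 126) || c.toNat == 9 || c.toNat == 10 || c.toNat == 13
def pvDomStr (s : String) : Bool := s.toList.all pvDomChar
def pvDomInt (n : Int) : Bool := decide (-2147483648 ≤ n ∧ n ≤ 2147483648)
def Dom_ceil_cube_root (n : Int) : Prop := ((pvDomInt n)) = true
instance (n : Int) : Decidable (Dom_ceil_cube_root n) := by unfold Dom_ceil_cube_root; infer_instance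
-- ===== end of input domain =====

-- B replaces A's binary search with Newton's integer cube-root iteration plus a
-- perfect-cube check (objective: alternative algorithm of similar cost).

-- ===== PORT A =====
-- mid = (lo + hi) // 2
def pyMid (lo hi : Int) : Int := PySem.Int.floordiv (lo + hi) 2

-- the 'while lo < hi' binary-search loop of A
def csrLoopA (n lo hi : Int) : Int :=
  if hlh : lo < hi then
    if (pyMid lo hi) ^ 3 < n then csrLoopA n (pyMid lo hi + 1) hi
    else csrLoopA n lo (pyMid lo hi)
  else lo
termination_by (hi - lo).toNat
decreasing_by
  · have h1 := PySem.Int.floordiv_two_mid_bounds (le_of_lt hlh)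
    simp only [pyMid] at *
    omega
  · have h2 : pyMid lo hi < hi := by
      unfold pyMid
      rw [PySem.Int.floordiv_lt_iff_lt_mul (by norm_num : (0:Int) < 2)]
      omega
    have h1 := PySem.Int.floordiv_two_mid_bounds (le_of_lt hlh)
    simp only [pyMid] at *
    omega

def ceil_cube_root (n : Int) : Int :=
  -- 'if n < 0: raise ValueError' — excluded by Pre_ceil_cube_root
  csrLoopA n 0 ((1 : Int) <<< ((PySem.Int.bitLength n + 2) / 3))

-- ===== PORT B =====
-- y = (2*x + n // (x*x)) // 3
def newtonStep (n x : Int) : Int :=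
  PySem.Int.floordiv (2 * x + PySem.Int.floordiv n (x * x)) 3

-- B's 'while True' loop: step while the estimate strictly decreases
-- ('0 < x' only makes the recursion total; the loop always runs with x ≥ 1)
def newtonLoopB (n x : Int) : Int :=
  if hg : newtonStep n x < x ∧ 0 < x then newtonLoopB n (newtonStep n x) else x
termination_by x.toNat
decreasing_by omega

def ceil_cube_root_alt (n : Int) : Int :=
  -- 'if n < 0: raise ValueError' — excluded by Pre_ceil_cube_root
  if n = 0 then 0
  else
    let x := newtonLoopB n ((1 : Int) <<< ((PySem.Int.bitLength n + 2) / 3))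
    if x ^ 3 = n then x else x + 1

-- ===== PRECONDITION & SPEC =====
-- Pre_ excludes exactly n < 0, where the Python A raises ValueError.
def Pre_ceil_cube_root (n : Int) : Prop := 0 ≤ n
instance (n : Int) : Decidable (Pre_ceil_cube_root n) := by unfold Pre_ceil_cube_root; infer_instance
def pvWitness_ceil_cube_root : Int := 7

def Spec_ceil_cube_root (n : Int) (out : Int) : Prop := out = ceil_cube_root_alt n
instance (n : Int) (out : Int) : Decidable (Spec_ceil_cube_root n out) := by unfold Spec_ceil_cube_root; infer_instance

-- ===== CLAIM (what is proved, stated in full; the proofs are below) =====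
def Claim_equal_ceil_cube_root : Prop := ∀ (n : Int), Dom_ceil_cube_root n → Pre_ceil_cube_root n → Spec_ceil_cube_root n (ceil_cube_root n)

-- ===== LEMMAS AND PROOFS =====

-- "r is the least nonnegative integer with n ≤ r³"
def IsCeilCbrt (n r : Int) : Prop :=
  0 ≤ r ∧ n ≤ r ^ 3 ∧ ∀ j : Int, 0 ≤ j → j < r → j ^ 3 < n

theorem isCeilCbrt_unique {n r r' : Int} (h : IsCeilCbrt n r) (h' : IsCeilCbrt n r') : r = r' := by
  obtain ⟨h0, h1, h2⟩ := h
  obtain ⟨h0', h1', h2'⟩ := h'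
  by_contra hne
  rcases lt_or_gt_of_ne hne with hlt | hlt
  · exact absurd h1 (not_le.mpr (h2' r h0 hlt))
  · exact absurd h1' (not_le.mpr (h2 r' h0' hlt))

theorem csrLoopA_isCeil (n : Int) : ∀ (k : Nat) (lo hi : Int), (hi - lo).toNat = k →
    0 ≤ lo → lo ≤ hi → (∀ j : Int, 0 ≤ j → j < lo → j ^ 3 < n) → n ≤ hi ^ 3 →
    IsCeilCbrt n (csrLoopA n lo hi) := by
  intro k
  induction k using Nat.strong_induction_on with
  | _ k ih =>
    intro lo hi hk h0 hle hbelow hhi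
    rw [csrLoopA]
    by_cases hlt : lo < hi
    · have hmid := PySem.Int.floordiv_two_mid_bounds (le_of_lt hlt)
      have hmidlt : pyMid lo hi < hi := by
        unfold pyMid
        rw [PySem.Int.floordiv_lt_iff_lt_mul (by norm_num : (0:Int) < 2)]
        omega
      have hmid' : lo ≤ pyMid lo hi := hmid.1
      simp only [hlt, dif_pos]
      by_cases hc : (pyMid lo hi) ^ 3 < n
      · simp only [hc, if_pos]
        refine ih (hi - (pyMid lo hi + 1)).toNat (by omega) _ _ rfl (by omega) (by omega) ?_ hhi
        intro j hj hjlt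
        have hj3 : j ^ 3 ≤ (pyMid lo hi) ^ 3 := pow_le_pow_left₀ hj (by omega) 3
        omega
      · simp only [hc, if_neg, not_false_iff]
        exact ih (pyMid lo hi - lo).toNat (by omega) _ _ rfl h0 hmid' hbelow (by omega)
    · simp only [hlt, dif_neg, not_false_iff]
      have : lo = hi := le_antisymm hle (not_lt.mp hlt)
      exact ⟨h0, this ▸ hhi, hbelow⟩

-- Newton step never drops below the floor cube root c (kernel of the Newton proof):
-- (3c - 2x)·x² ≤ c³ ≤ n, i.e. (x-c)²(2x+c) ≥ 0.
theorem newtonStep_ge (n c x : Int) (hc : 0 ≤ c) (hcn : c ^ 3 ≤ n) (hx : 1 ≤ x) :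
    c ≤ newtonStep n x := by
  unfold newtonStep
  rw [PySem.Int.le_floordiv_iff_mul_le (by norm_num : (0:Int) < 3)]
  have hxx : (0:Int) < x * x := by positivity
  have h1 : c * 3 - 2 * x ≤ PySem.Int.floordiv n (x * x) := by
    rw [PySem.Int.le_floordiv_iff_mul_le hxx]
    nlinarith [sq_nonneg (x - c)]
  omega

theorem newtonLoopB_eq (n c : Int) (hc1 : 1 ≤ c) (hcn : c ^ 3 ≤ n) (hnc : n < (c + 1) ^ 3) :
    ∀ (k : Nat) (x : Int), x.toNat = k → c ≤ x → newtonLoopB n x = c := by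
  intro k
  induction k using Nat.strong_induction_on with
  | _ k ih =>
    intro x hk hcx
    have hx1 : 1 ≤ x := le_trans hc1 hcx
    have hy : c ≤ newtonStep n x := newtonStep_ge n c x (by omega) hcn hx1
    rw [newtonLoopB]
    by_cases hlt : newtonStep n x < x
    · simp only [hlt, and_true, dif_pos, (by omega : 0 < x)]
      exact ih (newtonStep n x).toNat (by omega) _ rfl hy
    · have : ¬ (newtonStep n x < x ∧ 0 < x) := by tauto
      simp only [this, dif_neg, not_false_iff]
      -- loop stops: x ≤ y forces x³ ≤ n, hence x ≤ c, hence x = c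
      have hxy : x ≤ newtonStep n x := not_lt.mp hlt
      unfold newtonStep at hxy
      rw [PySem.Int.le_floordiv_iff_mul_le (by norm_num : (0:Int) < 3)] at hxy
      have hdiv : x ≤ PySem.Int.floordiv n (x * x) := by omega
      rw [PySem.Int.le_floordiv_iff_mul_le (mul_pos (by omega : (0:Int) < x) (by omega)) ] at hdiv
      have hx3 : x ^ 3 ≤ n := by nlinarith
      have hxc : x ≤ c := by
        by_contra hcon
        rw [Int.not_le] at hcon
        have : (c + 1) ^ 3 ≤ x ^ 3 := pow_le_pow_left₀ (by omega) (by omega) 3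
        omega
      omega

-- the shared initial bound: n < (1 << ((bit_length(n)+2)//3))³ and it is ≥ 1
theorem seed_facts (n : Int) (hn : 0 ≤ n) :
    1 ≤ (1 : Int) <<< ((PySem.Int.bitLength n + 2) / 3) ∧
    n < ((1 : Int) <<< ((PySem.Int.bitLength n + 2) / 3)) ^ 3 := by
  set b := PySem.Int.bitLength n with hb
  have hsh : (1 : Int) <<< ((b + 2) / 3) = 2 ^ ((b + 2) / 3) := by
    rw [Int.shiftLeft_eq]; ring
  have hlt : n.natAbs < 2 ^ b := PySem.Int.lt_two_pow_bitLength n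
  have hble : b ≤ 3 * ((b + 2) / 3) := by omega
  have hpow : (2 : Nat) ^ b ≤ 2 ^ (3 * ((b + 2) / 3)) := Nat.pow_le_pow_right (by norm_num) hble
  constructor
  · rw [hsh]; exact one_le_pow₀ (by norm_num)
  · rw [hsh, ← pow_mul]
    have : n.natAbs < 2 ^ ((b + 2) / 3 * 3) := by
      calc n.natAbs < 2 ^ b := hlt
        _ ≤ 2 ^ (3 * ((b + 2) / 3)) := hpow
        _ = 2 ^ ((b + 2) / 3 * 3) := by ring_nf
    calc n ≤ (n.natAbs : Int) := Int.le_natAbs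
      _ < ((2 : Nat) ^ ((b + 2) / 3 * 3) : Nat) := by exact_mod_cast this
      _ = (2 : Int) ^ ((b + 2) / 3 * 3) := by push_cast; ring

-- existence of the floor cube root for n ≥ 1
theorem exists_floor_cbrt (n : Int) (hn : 1 ≤ n) :
    ∃ c : Int, 1 ≤ c ∧ c ^ 3 ≤ n ∧ n < (c + 1) ^ 3 := by
  have hP : ∃ k : Nat, n.toNat < (k + 1) ^ 3 :=
    ⟨n.toNat, Nat.lt_of_lt_of_le (Nat.lt_succ_self _) (Nat.le_self_pow (by norm_num) _)⟩
  classical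
  let c0 := Nat.find hP
  have hfind : n.toNat < (c0 + 1) ^ 3 := Nat.find_spec hP
  have hc0pos : 1 ≤ c0 := by
    by_contra h
    have : c0 = 0 := by omega
    rw [this] at hfind
    simp at hfind
    omega
  have hmin : ¬ n.toNat < (c0 - 1 + 1) ^ 3 := Nat.find_min hP (by omega)
  have hnt : (n.toNat : Int) = n := Int.toNat_of_nonneg (by omega)
  refine ⟨(c0 : Int), by exact_mod_cast hc0pos, ?_, ?_⟩
  · have h1 : (c0 : Nat) ^ 3 ≤ n.toNat := by
      have he : c0 - 1 + 1 = c0 := by omega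
      rw [he] at hmin
      omega
    rw [← hnt]
    exact_mod_cast h1
  · rw [← hnt]
    exact_mod_cast hfind

theorem isCeil_of_floor (n c : Int) (hc1 : 1 ≤ c) (hcn : c ^ 3 ≤ n) (hnc : n < (c + 1) ^ 3) :
    IsCeilCbrt n (if c ^ 3 = n then c else c + 1) := by
  by_cases heq : c ^ 3 = n
  · simp only [heq, if_pos]
    refine ⟨by omega, le_of_eq heq.symm, ?_⟩
    intro j hj hjlt
    have : j ^ 3 < c ^ 3 := pow_lt_pow_left₀ hjlt hj (by norm_num)
    omega
  · simp only [heq, if_neg, not_false_iff]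
    refine ⟨by omega, by omega, ?_⟩
    intro j hj hjlt
    have hjc : j ≤ c := by omega
    have : j ^ 3 ≤ c ^ 3 := pow_le_pow_left₀ hj hjc 3
    omega

-- ===== VERDICT (by name: the statement is the Claim_ definition above) =====
theorem ceil_cube_root_spec : Claim_equal_ceil_cube_root := by
  intro n _ hpre
  have hn : 0 ≤ n := hpre
  unfold Spec_ceil_cube_root ceil_cube_root ceil_cube_root_alt
  obtain ⟨hs1, hs2⟩ := seed_facts n hpre
  set s := (1 : Int) <<< ((PySem.Int.bitLength n + 2) / 3) with hsdef
  have hA : IsCeilCbrt n (csrLoopA n 0 s) :=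
    csrLoopA_isCeil n (s - 0).toNat 0 s rfl le_rfl (le_trans zero_le_one hs1)
      (by intro j hj hjlt; omega) (le_of_lt hs2)
  by_cases hn0 : n = 0
  · subst hn0
    simp only [if_pos]
    have h0 : IsCeilCbrt 0 0 := ⟨le_rfl, by norm_num, by intro j hj hjlt; omega⟩
    exact isCeilCbrt_unique hA h0
  · simp only [hn0, if_neg, not_false_iff]
    obtain ⟨c, hc1, hcn, hnc⟩ := exists_floor_cbrt n (by omega)
    have hcs : c ≤ s := by
      by_contra hcon
      rw [Int.not_le] at hcon
      have : s ^ 3 ≤ c ^ 3 := pow_le_pow_left₀ (by linarith) (le_of_lt hcon) 3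
      linarith
    have hB : newtonLoopB n s = c := newtonLoopB_eq n c hc1 hcn hnc s.toNat s rfl hcs
    have hAeq : csrLoopA n 0 s = (if c ^ 3 = n then c else c + 1) :=
      isCeilCbrt_unique hA (isCeil_of_floor n c hc1 hcn hnc)
    rw [hAeq, hB]
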